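-- pv_equiv track=rewrite | github.com/Arunar09/AI-AH | interfaces/web_interface.py | _analyze_scaling_needs
-- ===== SOURCE A (Python) =====
-- from typing import Dict, List, Any, Optional
--
-- def _analyze_scaling_needs(requirements: Dict) -> Dict:
--     """Analyze requirements to determine scaling needs"""
--     needs = {
--         "infrastructure_complexity": "low",
--         "security_requirements": "standard",
--         "availability_requirements": "standard",
--         "monitoring_needs": "basic",
--         "compliance_requirements": "none"
--     }
--
--     for req in requirements.get('requirements', []):
--         if req.get('category') == "security" and any(keyword in req.get('answer', '').lower() for keyword in ["compliance", "hipaa", "pci", "soc2"]):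
--             needs["security_requirements"] = "high"
--             needs["compliance_requirements"] = "required"
--
--         if req.get('category') == "availability" and "99.9" in req.get('answer', ''):
--             needs["availability_requirements"] = "high"
--
--         if req.get('category') == "monitoring" and any(keyword in req.get('answer', '').lower() for keyword in ["advanced", "apm", "ml"]):
--             needs["monitoring_needs"] = "advanced"
--
--     return needs
-- ===== SOURCE B (Python) =====
-- def _analyze_scaling_needs(requirements):
--     """Analyze requirements to determine scaling needs (bucket-by-category then derive)."""
--     buckets = {}
--     for req in requirements.get('requirements', []):
--         buckets.setdefault(req.get('category'), []).append(req.get('answer', ''))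
--
--     sec_hit = any(any(k in a.lower() for k in ("compliance", "hipaa", "pci", "soc2"))
--                   for a in buckets.get('security', []))
--     avail_hit = any("99.9" in a for a in buckets.get('availability', []))
--     mon_hit = any(any(k in a.lower() for k in ("advanced", "apm", "ml"))
--                   for a in buckets.get('monitoring', []))
--
--     return {
--         "infrastructure_complexity": "low",
--         "security_requirements": "high" if sec_hit else "standard",
--         "availability_requirements": "high" if avail_hit else "standard",
--         "monitoring_needs": "advanced" if mon_hit else "basic",
--         "compliance_requirements": "required" if sec_hit else "none",
--     }
-- ===== Notes on version B (the rewrite author's own statement) =====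
-- stated objective: alternative
-- what changed: Replaces the single interleaved scan that mutates five flag slots with a one-pass bucketing of answers into a dict keyed by category, from which each flag is then derived independently; the result dict is built once as a literal.
import Mathlib
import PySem

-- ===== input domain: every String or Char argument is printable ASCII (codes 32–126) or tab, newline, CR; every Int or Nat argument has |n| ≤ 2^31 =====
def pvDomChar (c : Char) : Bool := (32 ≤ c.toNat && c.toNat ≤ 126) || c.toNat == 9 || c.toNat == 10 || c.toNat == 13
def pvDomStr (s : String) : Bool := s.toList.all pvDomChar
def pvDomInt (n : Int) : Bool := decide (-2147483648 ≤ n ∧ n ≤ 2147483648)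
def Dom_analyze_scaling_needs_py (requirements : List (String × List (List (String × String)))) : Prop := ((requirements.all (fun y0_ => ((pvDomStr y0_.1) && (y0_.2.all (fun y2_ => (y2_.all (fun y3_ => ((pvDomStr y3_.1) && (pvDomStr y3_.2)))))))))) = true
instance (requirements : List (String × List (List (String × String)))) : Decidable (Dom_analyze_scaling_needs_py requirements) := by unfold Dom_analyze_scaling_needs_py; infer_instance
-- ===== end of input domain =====

-- B buckets the answers by category into a dict in one pass, then derives each flag from its bucket;
-- same cost, a different structure (index-then-derive instead of an interleaved flag-mutating scan).

-- ===== PORT A =====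
-- A's loop step: the three sequential `if`s mutating the needs dict.
def pvStepA (needs : PySem.Dict String String) (req : List (String × String)) : PySem.Dict String String :=
  let d : PySem.Dict String String := PySem.Dict.mk req
  let needs :=
    if (d.get? "category" == some "security") &&
        (["compliance", "hipaa", "pci", "soc2"].any
          (fun k => PySem.Str.isIn k (PySem.Str.lower (d.getD "answer" "")))) then
      (needs.insert "security_requirements" "high").insert "compliance_requirements" "required"
    else needs
  let needs :=
    if (d.get? "category" == some "availability") && PySem.Str.isIn "99.9" (d.getD "answer" "") then
      needs.insert "availability_requirements" "high"
    else needs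
  if (d.get? "category" == some "monitoring") &&
      (["advanced", "apm", "ml"].any
        (fun k => PySem.Str.isIn k (PySem.Str.lower (d.getD "answer" "")))) then
    needs.insert "monitoring_needs" "advanced"
  else needs

def analyze_scaling_needs_py (requirements : List (String × List (List (String × String)))) : List (String × String) :=
  let needs : PySem.Dict String String := PySem.Dict.mk
    [("infrastructure_complexity", "low"),
     ("security_requirements", "standard"),
     ("availability_requirements", "standard"),
     ("monitoring_needs", "basic"),
     ("compliance_requirements", "none")]
  let reqs := (PySem.Dict.mk requirements).getD "requirements" []
  (reqs.foldl pvStepA needs).items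

-- ===== PORT B =====
def analyze_scaling_needs_py_alt (requirements : List (String × List (List (String × String)))) : List (String × String) :=
  let reqs := (PySem.Dict.mk requirements).getD "requirements" []
  -- buckets.setdefault(req.get('category'), []).append(req.get('answer', ''))
  let buckets : PySem.Dict (Option String) (List String) :=
    reqs.foldl (fun b req =>
      let d : PySem.Dict String String := PySem.Dict.mk req
      b.modify (d.get? "category") [] (fun l => l ++ [d.getD "answer" ""])) PySem.Dict.empty
  let secHit := (buckets.getD (some "security") []).any (fun a =>
    ["compliance", "hipaa", "pci", "soc2"].any (fun k => PySem.Str.isIn k (PySem.Str.lower a)))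
  let availHit := (buckets.getD (some "availability") []).any (fun a => PySem.Str.isIn "99.9" a)
  let monHit := (buckets.getD (some "monitoring") []).any (fun a =>
    ["advanced", "apm", "ml"].any (fun k => PySem.Str.isIn k (PySem.Str.lower a)))
  [("infrastructure_complexity", "low"),
   ("security_requirements", if secHit then "high" else "standard"),
   ("availability_requirements", if availHit then "high" else "standard"),
   ("monitoring_needs", if monHit then "advanced" else "basic"),
   ("compliance_requirements", if secHit then "required" else "none")]

-- ===== PRECONDITION & SPEC =====
def Spec_analyze_scaling_needs_py (requirements : List (String × List (List (String × String)))) (out : List (String × String)) : Prop := out = analyze_scaling_needs_py_alt requirements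
instance (requirements : List (String × List (List (String × String)))) (out : List (String × String)) : Decidable (Spec_analyze_scaling_needs_py requirements out) := by unfold Spec_analyze_scaling_needs_py; infer_instance

-- ===== CLAIM (what is proved, stated in full; the proofs are below) =====
def Claim_equal_analyze_scaling_needs_py : Prop := ∀ (requirements : List (String × List (List (String × String)))), Dom_analyze_scaling_needs_py requirements → Spec_analyze_scaling_needs_py requirements (analyze_scaling_needs_py requirements)

-- ===== LEMMAS AND PROOFS =====

-- the three per-requirement conditions of A's loop
def pvCondS (req : List (String × String)) : Bool :=
  let d : PySem.Dict String String := PySem.Dict.mk req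
  (d.get? "category" == some "security") &&
    (["compliance", "hipaa", "pci", "soc2"].any
      (fun k => PySem.Str.isIn k (PySem.Str.lower (d.getD "answer" ""))))
def pvCondA (req : List (String × String)) : Bool :=
  let d : PySem.Dict String String := PySem.Dict.mk req
  (d.get? "category" == some "availability") && PySem.Str.isIn "99.9" (d.getD "answer" "")
def pvCondM (req : List (String × String)) : Bool :=
  let d : PySem.Dict String String := PySem.Dict.mk req
  (d.get? "category" == some "monitoring") &&
    (["advanced", "apm", "ml"].any
      (fun k => PySem.Str.isIn k (PySem.Str.lower (d.getD "answer" ""))))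

-- the needs dict as a function of the three flags
def pvNeeds (s a m : Bool) : PySem.Dict String String := PySem.Dict.mk
  [("infrastructure_complexity", "low"),
   ("security_requirements", if s then "high" else "standard"),
   ("availability_requirements", if a then "high" else "standard"),
   ("monitoring_needs", if m then "advanced" else "basic"),
   ("compliance_requirements", if s then "required" else "none")]

theorem pvStepA_needs (s a m : Bool) (req : List (String × String)) :
    pvStepA (pvNeeds s a m) req = pvNeeds (s || pvCondS req) (a || pvCondA req) (m || pvCondM req) := by
  unfold pvStepA pvCondS pvCondA pvCondM pvNeeds
  cases hS : pvCondS req <;> cases hA : pvCondA req <;> cases hM : pvCondM req <;>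
    simp only [pvCondS, pvCondA, pvCondM] at hS hA hM <;>
    simp only [hS, hA, hM, if_true, Bool.or_false, Bool.or_true] <;>
    cases s <;> cases a <;> cases m <;> rfl

theorem pvFoldA_needs (reqs : List (List (String × String))) (s a m : Bool) :
    reqs.foldl pvStepA (pvNeeds s a m)
      = pvNeeds (s || reqs.any pvCondS) (a || reqs.any pvCondA) (m || reqs.any pvCondM) := by
  induction reqs generalizing s a m with
  | nil => simp
  | cons r rs ih =>
    simp only [List.foldl_cons, pvStepA_needs, ih, List.any_cons, Bool.or_assoc]

theorem pvAny_filter_map {α β : Type} (l : List α) (p : α → Bool) (f : α → β) (q : β → Bool) :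
    ((l.filter p).map f).any q = l.any (fun x => p x && q (f x)) := by
  induction l with
  | nil => rfl
  | cons x xs ih =>
    by_cases h : p x = true <;> simp [h, ih]

-- B's bucket for category c is exactly the answers of the requirements with that category
theorem pvBucket_eq (reqs : List (List (String × String))) (c : Option String) :
    ((reqs.foldl (fun b req =>
        let d : PySem.Dict String String := PySem.Dict.mk req
        b.modify (d.get? "category") [] (fun l => l ++ [d.getD "answer" ""]))
        (PySem.Dict.empty : PySem.Dict (Option String) (List String))).getD c [])
      = ((reqs.map (fun req =>
            ((PySem.Dict.mk req : PySem.Dict String String).get? "category",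
             (PySem.Dict.mk req : PySem.Dict String String).getD "answer" ""))).filter
          (fun p => p.1 == c)).map (·.2) := by
  have h := PySem.Dict.getD_foldl_modify_append
    (l := reqs.map (fun req =>
      ((PySem.Dict.mk req : PySem.Dict String String).get? "category",
       (PySem.Dict.mk req : PySem.Dict String String).getD "answer" "")))
    (d := (PySem.Dict.empty : PySem.Dict (Option String) (List String))) (c := c)
  rw [List.foldl_map] at h
  simpa using h

theorem pvHit_eq (reqs : List (List (String × String))) (c : String) (q : String → Bool) :
    ((reqs.foldl (fun b req =>
        let d : PySem.Dict String String := PySem.Dict.mk req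
        b.modify (d.get? "category") [] (fun l => l ++ [d.getD "answer" ""]))
        (PySem.Dict.empty : PySem.Dict (Option String) (List String))).getD (some c) []).any q
      = reqs.any (fun req =>
          ((PySem.Dict.mk req : PySem.Dict String String).get? "category" == some c) &&
          q ((PySem.Dict.mk req : PySem.Dict String String).getD "answer" "")) := by
  rw [pvBucket_eq, pvAny_filter_map]
  simp only [List.any_map]
  rfl

-- ===== VERDICT (by name: the statement is the Claim_ definition above) =====
theorem analyze_scaling_needs_py_spec : Claim_equal_analyze_scaling_needs_py := by
  intro requirements _
  unfold Spec_analyze_scaling_needs_py analyze_scaling_needs_py analyze_scaling_needs_py_alt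
  dsimp only
  have h0 : (PySem.Dict.mk
      [("infrastructure_complexity", "low"),
       ("security_requirements", "standard"),
       ("availability_requirements", "standard"),
       ("monitoring_needs", "basic"),
       ("compliance_requirements", "none")] : PySem.Dict String String) = pvNeeds false false false := rfl
  rw [h0, pvFoldA_needs]
  rw [pvHit_eq, pvHit_eq, pvHit_eq]
  simp only [Bool.false_or, pvNeeds]
  rfl
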